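-- pv_equiv track=rewrite | github.com/GlennS/MathsScripts | nontransitive_dice.py | generate_dice
-- ===== SOURCE A (Python) =====
-- from itertools import combinations_with_replacement, product, groupby
--
-- def generate_dice(max_side, num_dice):
--     assignments = product(range(num_dice + 1), repeat=max_side)
--     for assignment in assignments:
--         dice = [(die, side) for (die, side) in sorted(zip(assignment, range(1, max_side + 1)))
--             if die > 0] # die number 0 means 'don't allocate this side'
--
--         dice = groupby(dice, key=lambda die_with_side: die_with_side[0])
--
--         dice = [[side for (die, side) in group] for key, group in dice]
--         dice = [sides for sides in dice if len(sides) > 0]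
--
--         if len(dice) > 2: # 1 die scenario doesn't work, and 2 dice scenario just isn't very interesting.
--             yield dice
-- ===== SOURCE B (Python) =====
-- from itertools import product
--
-- def generate_dice(max_side, num_dice):
--     sides = range(1, max_side + 1)
--     for assignment in product(range(num_dice + 1), repeat=max_side):
--         dice = [[s for s, a in zip(sides, assignment) if a == d]
--                 for d in sorted(set(assignment)) if d > 0]
--         if len(dice) > 2:
--             yield dice
-- ===== Notes on version B (the rewrite author's own statement) =====
-- stated objective: simpler
-- what changed: Replaces the per-assignment sort of (die, side) pairs plus consecutive-groupby with a direct bucketing scan: for each die number 1..num_dice collect its sides from the assignment in order and keep the nonempty groups, eliminating sorted() and groupby() entirely.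
import Mathlib
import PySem

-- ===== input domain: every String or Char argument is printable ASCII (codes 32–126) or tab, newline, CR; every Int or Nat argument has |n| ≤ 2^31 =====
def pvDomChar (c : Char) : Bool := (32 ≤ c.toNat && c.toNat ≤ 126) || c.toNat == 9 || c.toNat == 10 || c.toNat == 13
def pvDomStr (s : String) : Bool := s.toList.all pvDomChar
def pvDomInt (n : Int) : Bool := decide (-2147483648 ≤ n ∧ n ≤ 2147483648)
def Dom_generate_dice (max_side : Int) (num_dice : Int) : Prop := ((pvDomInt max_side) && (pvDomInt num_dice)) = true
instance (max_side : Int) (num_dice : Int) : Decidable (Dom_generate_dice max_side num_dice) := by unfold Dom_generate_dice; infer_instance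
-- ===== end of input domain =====

-- B replaces A's per-assignment sort of (die, side) pairs + consecutive groupby with a direct
-- bucketing scan over die numbers 1..num_dice, keeping nonempty side groups (objective: simpler).

-- ===== PORT A =====
-- itertools.product(pool, repeat=n) over an Int pool, in product order (shared by both ports,
-- since B keeps A's outer enumeration loop)
def pvProdRep (pool : List Int) : Nat → List (List Int)
  | 0 => [[]]
  | n+1 => pool.flatMap (fun x => (pvProdRep pool n).map (x :: ·))

def generate_dice (max_side : Int) (num_dice : Int) : List (List (List Int)) :=
  (pvProdRep (PySem.List.pyRange 0 (num_dice + 1) 1) max_side.toNat).foldl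
    (fun acc assignment =>
      -- dice = [(die, side) for (die, side) in sorted(zip(assignment, range(1, max_side+1))) if die > 0]
      let dice1 := (PySem.List.sorted2
          (assignment.zip (PySem.List.pyRange 1 (max_side + 1) 1)) Prod.fst Prod.snd).filter
          (fun p => decide (0 < p.1))
      -- groupby(dice, key=fst), then [[side for (die, side) in group] for key, group in dice]
      let dice2 := (List.splitBy (fun a b => a.1 == b.1) dice1).map (fun g => g.map Prod.snd)
      -- [sides for sides in dice if len(sides) > 0]
      let dice3 := dice2.filter (fun sides => decide (0 < sides.length))
      if 2 < dice3.length then acc ++ [dice3] else acc) []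

-- ===== PORT B =====
def generate_dice_alt (max_side : Int) (num_dice : Int) : List (List (List Int)) :=
  (pvProdRep (PySem.List.pyRange 0 (num_dice + 1) 1) max_side.toNat).foldl
    (fun acc assignment =>
      -- dice = [[s for s, a in zip(sides, assignment) if a == d]
      --         for d in sorted(set(assignment)) if d > 0]
      let dice := (PySem.List.sorted (PySem.Set.ofList assignment) (fun x => x)).foldl
        (fun dl d =>
          if 0 < d then
            dl ++ [((PySem.List.pyRange 1 (max_side + 1) 1).zip assignment).foldl
              (fun g sa => if sa.2 == d then g ++ [sa.1] else g) []]
          else dl) []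
      if 2 < dice.length then acc ++ [dice] else acc) []

-- ===== PRECONDITION & SPEC =====
-- Pre_ excludes max_side < 0, where Python's product(..., repeat=max_side) raises ValueError.
def Pre_generate_dice (max_side : Int) (num_dice : Int) : Prop := 0 ≤ max_side
instance (max_side : Int) (num_dice : Int) : Decidable (Pre_generate_dice max_side num_dice) := by unfold Pre_generate_dice; infer_instance
def pvWitness_generate_dice : Int × Int := (2, 3)
def Spec_generate_dice (max_side : Int) (num_dice : Int) (out : List (List (List Int))) : Prop := out = generate_dice_alt max_side num_dice
instance (max_side : Int) (num_dice : Int) (out : List (List (List Int))) : Decidable (Spec_generate_dice max_side num_dice out) := by unfold Spec_generate_dice; infer_instance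

-- ===== CLAIM (what is proved, stated in full; the proofs are below) =====
def Claim_equal_generate_dice : Prop := ∀ (max_side : Int) (num_dice : Int), Dom_generate_dice max_side num_dice → Pre_generate_dice max_side num_dice → Spec_generate_dice max_side num_dice (generate_dice max_side num_dice)


-- ===== LEMMAS AND PROOFS =====

-- Python's tuple order on (die, side) pairs, as a linear order
def pvKey (p : Int × Int) : Lex (Int × Int) := toLex p

theorem mem_pvProdRep {pool : List Int} {n : Nat} {as : List Int} (h : as ∈ pvProdRep pool n) :
    as.length = n ∧ ∀ a ∈ as, a ∈ pool := by
  induction n generalizing as with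
  | zero => simp [pvProdRep] at h; simp [h]
  | succ n ih =>
    simp only [pvProdRep, List.mem_flatMap, List.mem_map] at h
    obtain ⟨x, hx, bs, hbs, rfl⟩ := h
    obtain ⟨hl, hm⟩ := ih hbs
    refine ⟨by simp [hl], ?_⟩
    intro a ha
    rcases List.mem_cons.mp ha with rfl | ha
    · exact hx
    · exact hm a ha

-- sorted2 with keys (fst, snd) is the stable sort under the lexicographic key pvKey
theorem sorted2_eq_sorted_key (xs : List (Int × Int)) :
    PySem.List.sorted2 xs Prod.fst Prod.snd = PySem.List.sorted xs pvKey := by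
  rw [PySem.List.sorted_eq_foldl_insertBy]
  have hb : (fun a b : Int × Int =>
        decide (a.1 < b.1) || (!decide (b.1 < a.1) && decide (a.2 < b.2)))
      = fun a b => decide (pvKey a < pvKey b) := by
    funext a b
    have h : (a.1 < b.1 ∨ (¬ b.1 < a.1 ∧ a.2 < b.2)) ↔ pvKey a < pvKey b := by
      simp only [pvKey, Prod.Lex.lt_iff, ofLex_toLex]
      omega
    have hd : decide (a.1 < b.1 ∨ (¬ b.1 < a.1 ∧ a.2 < b.2))
        = (decide (a.1 < b.1) || (!decide (b.1 < a.1) && decide (a.2 < b.2))) := by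
      by_cases h1 : a.1 < b.1 <;> by_cases h2 : b.1 < a.1 <;> by_cases h3 : a.2 < b.2 <;>
        simp [h1, h2, h3]
    rw [← hd]
    exact decide_eq_decide.mpr h
  simp only [PySem.List.sorted2, if_neg (by decide : ¬ (false = true)), hb]

-- bucketing ps by first component over a Nodup cover D is a permutation of ps
theorem flatMap_filter_perm (D : List Int) (ps : List (Int × Int)) (hD : D.Nodup)
    (hps : ∀ p ∈ ps, p.1 ∈ D) :
    (D.flatMap (fun d => ps.filter (fun p => p.1 == d))).Perm ps := by
  induction D generalizing ps with
  | nil =>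
    cases ps with
    | nil => simp
    | cons p t => exact absurd (hps p (by simp)) (by simp)
  | cons d D' ih =>
    simp only [List.flatMap_cons]
    have hnd : D'.Nodup := (List.nodup_cons.mp hD).2
    have hdD : d ∉ D' := (List.nodup_cons.mp hD).1
    have step : ∀ d' ∈ D', ps.filter (fun p => p.1 == d')
        = (ps.filter (fun p => !(p.1 == d))).filter (fun p => p.1 == d') := by
      intro d' hd'
      rw [List.filter_filter]
      have : (fun p : Int × Int => p.1 == d' && !(p.1 == d)) = fun p => p.1 == d' := by
        funext p
        have hdd : d' ≠ d := fun e => hdD (e ▸ hd')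
        by_cases h : p.1 = d'
        · simp [h, hdd]
        · simp [h]
      rw [this]
    have hflat : D'.flatMap (fun d' => ps.filter (fun p => p.1 == d'))
        = D'.flatMap (fun d' => (ps.filter (fun p => !(p.1 == d))).filter (fun p => p.1 == d')) := by
      apply List.flatMap_congr  -- may not exist; fallback below
      intro d' hd'
      exact step d' hd'
    have hperm2 : (D'.flatMap (fun d' => ps.filter (fun p => p.1 == d'))).Perm
        (ps.filter (fun p => !(p.1 == d))) := by
      rw [hflat]
      apply ih
      · exact hnd
      · intro p hp
        have hmem := List.mem_filter.mp hp
        have h1 := hps p hmem.1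
        have h2 : ¬ p.1 = d := by simpa using hmem.2
        rcases List.mem_cons.mp h1 with h | h
        · exact absurd h h2
        · exact h
    exact (List.Perm.append_left _ hperm2).trans
      (List.filter_append_perm (fun p : Int × Int => p.1 == d) ps)

-- concatenated buckets, taken over an increasing D, are strictly increasing under pvKey
theorem pairwise_key_flatMap (D : List Int) (ps : List (Int × Int))
    (hsnd : ps.Pairwise (fun a b => a.2 < b.2)) (hD : D.Pairwise (· < ·)) :
    (D.flatMap (fun d => ps.filter (fun p => p.1 == d))).Pairwise
      (fun a b => pvKey a < pvKey b) := by
  induction D with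
  | nil => simp
  | cons d D' ih =>
    have hD' : D'.Pairwise (· < ·) := hD.tail
    have hlt : ∀ d' ∈ D', d < d' := by
      intro d' hd'; exact List.rel_of_pairwise_cons hD hd'
    simp only [List.flatMap_cons]
    rw [List.pairwise_append]
    refine ⟨?_, ih hD', ?_⟩
    · -- within the d bucket: fst both d, snd strictly increasing
      have h1 : (ps.filter (fun p => p.1 == d)).Pairwise (fun a b => a.2 < b.2) :=
        hsnd.filter _
      refine h1.imp_of_mem ?_
      intro a b ha hb hab
      have ha1 : a.1 = d := by simpa using (List.mem_filter.mp ha).2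
      have hb1 : b.1 = d := by simpa using (List.mem_filter.mp hb).2
      simp only [pvKey, Prod.Lex.lt_iff, ofLex_toLex]
      right
      exact ⟨by omega, hab⟩
    · intro a ha b hb
      have ha1 : a.1 = d := by simpa using (List.mem_filter.mp ha).2
      obtain ⟨d', hd', hbmem⟩ := List.mem_flatMap.mp hb
      have hb1 : b.1 = d' := by simpa using (List.mem_filter.mp hbmem).2
      have : d < d' := hlt d' hd'
      simp only [pvKey, Prod.Lex.lt_iff, ofLex_toLex]
      left; omega

theorem isChain_beq_of_const (d : Int) (l : List (Int × Int)) (hall : ∀ p ∈ l, p.1 = d) :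
    List.IsChain (fun x y : Int × Int => (x.1 == y.1) = true) l := by
  induction l with
  | nil => exact List.IsChain.nil
  | cons a t ih =>
    have ha : a.1 = d := hall a (by simp)
    have hall' : ∀ p ∈ t, p.1 = d := fun p hp => hall p (by simp [hp])
    refine (ih hall').cons ?_
    intro y hy
    have : y.1 = d := hall' y (List.mem_of_mem_head? hy)
    simp [ha, this]

-- groupby over concatenated constant-key buckets returns exactly the nonempty buckets
theorem splitBy_flatMap_blocks (R : List Int) (blk : Int → List (Int × Int))
    (hconst : ∀ d ∈ R, ∀ p ∈ blk d, p.1 = d) (hR : R.Pairwise (· ≠ ·)) :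
    List.splitBy (fun a b => a.1 == b.1) (R.flatMap blk)
      = R.filterMap (fun d => if blk d = [] then none else some (blk d)) := by
  induction R with
  | nil => simp
  | cons d R' ih =>
    have hR' : R'.Pairwise (· ≠ ·) := hR.tail
    have hconst' : ∀ d' ∈ R', ∀ p ∈ blk d', p.1 = d' := fun d' hd' => hconst d' (by simp [hd'])
    have hne : ∀ d' ∈ R', d ≠ d' := fun d' hd' => List.rel_of_pairwise_cons hR hd'
    simp only [List.flatMap_cons]
    rw [List.splitBy_append, ih hconst' hR']
    · rw [List.filterMap_cons]
      by_cases hblk : blk d = []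
      · simp [hblk]
      · rw [List.splitBy_of_isChain hblk
          (isChain_beq_of_const d (blk d) (hconst d (by simp)))]
        simp [hblk]
    · -- the last of blk d and head of the rest have different fst
      intro x hx y hy
      have hx1 : x.1 = d := hconst d (by simp) x (List.mem_of_mem_getLast? hx)
      have hymem : y ∈ R'.flatMap blk := List.mem_of_mem_head? hy
      obtain ⟨d', hd', hymem'⟩ := List.mem_flatMap.mp hymem
      have hy1 : y.1 = d' := hconst' d' hd' y hymem'
      have : d ≠ d' := hne d' hd'
      simp [hx1, hy1, this]

theorem filterMap_if_eq_filter_map (R : List Int) (g : Int → List Int) :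
    R.filterMap (fun d => if g d = [] then none else some (g d))
      = (R.filter (fun d => decide (g d ≠ []))).map g := by
  induction R with
  | nil => rfl
  | cons d R' ih =>
    by_cases h : g d = []
    · simp [h, ih]
    · simp [h, ih]

-- the per-assignment body of A equals the per-assignment body of B
theorem pv_inner_eq (ms nd : Int) (hms : 0 ≤ ms) (asg : List Int)
    (hlen : asg.length = ms.toNat) (hmem : ∀ a ∈ asg, 0 ≤ a ∧ a < nd + 1) :
    (((List.splitBy (fun a b => a.1 == b.1)
        ((PySem.List.sorted2 (asg.zip (PySem.List.pyRange 1 (ms + 1) 1))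
          Prod.fst Prod.snd).filter (fun p => decide (0 < p.1)))).map
        (fun g => g.map Prod.snd)).filter (fun sides => decide (0 < sides.length)))
      = (PySem.List.sorted (PySem.Set.ofList asg) (fun x => x)).foldl
        (fun dl d =>
          if 0 < d then
            dl ++ [((PySem.List.pyRange 1 (ms + 1) 1).zip asg).foldl
              (fun g sa => if sa.2 == d then g ++ [sa.1] else g) []]
          else dl) [] := by
  -- notation
  set S := PySem.List.pyRange 1 (ms + 1) 1 with hS
  set ps := asg.zip S with hps
  set blk := fun d => ps.filter (fun p => p.1 == d) with hblk
  have hSlen : S.length = ms.toNat := by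
    rw [hS, PySem.List.length_pyRange_one]; omega
  -- facts about ps
  have hsnd : ps.Pairwise (fun a b => a.2 < b.2) := by
    have : (ps.map Prod.snd).Pairwise (· < ·) := by
      rw [hps, List.map_snd_zip (by omega)]
      exact PySem.List.pairwise_lt_pyRange_one _ _
    exact List.pairwise_map.mp this
  have hfst : ∀ p ∈ ps, 0 ≤ p.1 ∧ p.1 < nd + 1 := by
    intro p hp
    have := List.of_mem_zip (a := p.1) (b := p.2) (by simpa using hp)
    exact hmem _ this.1
  -- STEP 1: the sort is the bucket concatenation over D = range(0, nd+1)
  have hsorted : PySem.List.sorted2 ps Prod.fst Prod.snd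
      = (PySem.List.pyRange 0 (nd + 1) 1).flatMap blk := by
    rw [sorted2_eq_sorted_key]
    apply PySem.List.sorted_eq_of_perm_of_pairwise_lt
    · exact flatMap_filter_perm _ _ (PySem.List.nodup_pyRange_one _ _)
        (fun p hp => PySem.List.mem_pyRange_one.mpr (hfst p hp))
    · exact pairwise_key_flatMap _ _ hsnd
        (PySem.List.pairwise_lt_pyRange_one _ _)
  -- STEP 2: filtering die > 0 drops exactly the d = 0 bucket
  have hfilter : (((PySem.List.pyRange 0 (nd + 1) 1).flatMap blk).filter
      (fun p => decide (0 < p.1)))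
      = (PySem.List.pyRange 1 (nd + 1) 1).flatMap blk := by
    by_cases hnd : 0 < nd + 1
    · rw [PySem.List.pyRange_one_cons hnd, List.flatMap_cons, List.filter_append]
      have h0 : (blk 0).filter (fun p => decide (0 < p.1)) = [] := by
        rw [List.filter_eq_nil_iff]
        intro p hp
        have : p.1 = 0 := by simpa using (List.mem_filter.mp hp).2
        simp [this]
      rw [h0, List.nil_append, List.filter_flatMap]
      apply List.flatMap_congr
      intro d hd
      rw [List.filter_eq_self]
      intro p hp
      have hp1 : p.1 = d := by simpa using (List.mem_filter.mp hp).2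
      have hd1 : 1 ≤ d := (PySem.List.mem_pyRange_one.mp hd).1
      simp; omega
    · rw [PySem.List.pyRange_one_eq_nil (by omega), PySem.List.pyRange_one_eq_nil (by omega)]
      simp
  -- STEP 3: groupby returns the nonempty buckets
  have hsplit : List.splitBy (fun a b => a.1 == b.1)
        ((PySem.List.pyRange 1 (nd + 1) 1).flatMap blk)
      = (PySem.List.pyRange 1 (nd + 1) 1).filterMap
        (fun d => if blk d = [] then none else some (blk d)) := by
    apply splitBy_flatMap_blocks
    · intro d _ p hp
      simpa using (List.mem_filter.mp hp).2
    · exact (PySem.List.pairwise_lt_pyRange_one _ _).imp (fun h => by omega)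
  -- STEP 4: B's inner loop maps the positive present die values to their buckets
  have hgroup : ∀ d : Int, (S.zip asg).foldl
      (fun g sa => if sa.2 == d then g ++ [sa.1] else g) [] = (blk d).map Prod.snd := by
    intro d
    rw [PySem.List.foldl_append_if (fun sa : Int × Int => sa.2 == d) Prod.fst]
    have hswap : S.zip asg = ps.map Prod.swap := by
      rw [hps, List.zip_swap]
    rw [hswap, List.filter_map, List.map_map, hblk]
    rfl
  have hB : (PySem.List.sorted (PySem.Set.ofList asg) (fun x => x)).foldl
        (fun dl d =>
          if 0 < d then
            dl ++ [(S.zip asg).foldl (fun g sa => if sa.2 == d then g ++ [sa.1] else g) []]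
          else dl) []
      = ((PySem.List.sorted (PySem.Set.ofList asg) (fun x => x)).filter
          (fun d => decide (0 < d))).map (fun d => (blk d).map Prod.snd) := by
    refine Eq.trans (PySem.List.foldl_congr_mem _ _
        (fun dl d => if 0 < d then dl ++ [(blk d).map Prod.snd] else dl) [] ?_) ?_
    · intro acc d _
      simp only [hgroup d]
    · rw [PySem.List.foldl_append_ite (fun d : Int => 0 < d)
        (fun d => (blk d).map Prod.snd)]
      simp
  -- STEP 5: the nonempty die values of range(1, nd+1) are the positive values present in asg
  have hfeq : (PySem.List.pyRange 1 (nd + 1) 1).filter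
        (fun d => decide ((blk d).map Prod.snd ≠ []))
      = (PySem.List.sorted (PySem.Set.ofList asg) (fun x => x)).filter
        (fun d => decide (0 < d)) := by
    have hmemlink : ∀ x : Int, (∃ p ∈ ps, p.1 = x) ↔ x ∈ asg := by
      intro x
      constructor
      · rintro ⟨p, hp, rfl⟩
        exact (List.of_mem_zip (a := p.1) (b := p.2) (by simpa using hp)).1
      · intro hx
        have : x ∈ ps.map Prod.fst := by
          rw [hps, List.map_fst_zip (by omega)]
          exact hx
        obtain ⟨p, hp, hpx⟩ := List.mem_map.mp this
        exact ⟨p, hp, hpx⟩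
    have h1 : ((PySem.List.pyRange 1 (nd + 1) 1).filter
        (fun d => decide ((blk d).map Prod.snd ≠ []))).Pairwise (· < ·) :=
      (PySem.List.pairwise_lt_pyRange_one _ _).filter _
    have h2 : ((PySem.List.sorted (PySem.Set.ofList asg) (fun x => x)).filter
        (fun d => decide (0 < d))).Pairwise (· < ·) :=
      (PySem.List.sorted_ofList_pairwise_lt _).filter _
    have hmem : ∀ x : Int, (x ∈ (PySem.List.pyRange 1 (nd + 1) 1).filter
          (fun d => decide ((blk d).map Prod.snd ≠ [])))
        ↔ x ∈ (PySem.List.sorted (PySem.Set.ofList asg) (fun x => x)).filter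
          (fun d => decide (0 < d)) := by
      intro x
      rw [List.mem_filter, List.mem_filter, PySem.List.mem_sorted, PySem.Set.mem_ofList,
        PySem.List.mem_pyRange_one]
      constructor
      · rintro ⟨hrange, hne⟩
        have hne' : blk x ≠ [] := fun e => by simp [e] at hne
        have : ∃ p ∈ ps, p.1 = x := by
          rcases List.exists_mem_of_ne_nil _ hne' with ⟨p, hp⟩
          have := List.mem_filter.mp hp
          exact ⟨p, this.1, by simpa using this.2⟩
        refine ⟨(hmemlink x).mp this, by simp; omega⟩
      · rintro ⟨hx, hpos⟩
        have hpos' : 0 < x := by simpa using hpos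
        obtain ⟨p, hp, hpx⟩ := (hmemlink x).mpr hx
        have hbnd := hmem x hx
        have hb : p ∈ blk x := by
          rw [hblk]
          exact List.mem_filter.mpr ⟨hp, by simp [hpx]⟩
        refine ⟨⟨by omega, by omega⟩, ?_⟩
        simp only [decide_eq_true_eq]
        intro e
        rw [List.map_eq_nil_iff] at e
        rw [e] at hb
        simp at hb
    have hperm : ((PySem.List.pyRange 1 (nd + 1) 1).filter
          (fun d => decide ((blk d).map Prod.snd ≠ []))).Perm
        ((PySem.List.sorted (PySem.Set.ofList asg) (fun x => x)).filter
          (fun d => decide (0 < d))) :=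
      (List.perm_ext_iff_of_nodup (h1.imp ne_of_lt) (h2.imp ne_of_lt)).mpr hmem
    exact List.eq_of_perm_of_sorted
      (fun a b _ _ hab hba => absurd hba (not_lt.mpr hab.le)) h1 h2 hperm
  -- assemble
  rw [hsorted, hfilter, hsplit]
  rw [List.map_filterMap]
  have hopt : (fun d => Option.map (fun g : List (Int × Int) => g.map Prod.snd)
        (if blk d = [] then none else some (blk d)))
      = fun d => if (blk d).map Prod.snd = [] then none else some ((blk d).map Prod.snd) := by
    funext d
    by_cases h : blk d = []
    · simp [h]
    · simp [h, List.map_eq_nil_iff]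
  rw [hopt, filterMap_if_eq_filter_map]
  rw [List.filter_eq_self.mpr]
  · rw [hB, hfeq]
  · intro sides hsides
    obtain ⟨d, hd, rfl⟩ := List.mem_map.mp hsides
    have hne : (blk d).map Prod.snd ≠ [] := by simpa using (List.mem_filter.mp hd).2
    have hne' : blk d ≠ [] := fun e => hne (by simp [e])
    simp [List.length_pos_iff, hne']

theorem generate_dice_spec : Claim_equal_generate_dice := by
  intro ms nd _ hms
  unfold Spec_generate_dice generate_dice generate_dice_alt
  apply PySem.List.foldl_congr_mem
  intro acc asg hasg
  obtain ⟨hlen, hpool⟩ := mem_pvProdRep hasg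
  have hmem : ∀ a ∈ asg, 0 ≤ a ∧ a < nd + 1 := by
    intro a ha
    exact PySem.List.mem_pyRange_one.mp (hpool a ha)
  have := pv_inner_eq ms nd hms asg hlen hmem
  simp only [this]
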